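-- pv_equiv track=rewrite | github.com/arjunpvm/PDSA | notes/w4/grpa.py | findMasterTank
-- ===== SOURCE A (Python) =====
-- from collections import deque
-- from collections import deque
--
-- class myStack:
--   def __init__(self):
--     self.stack = deque()
--
--   def pop(self):
--     return self.stack.pop()
--
--   def push(self, x):
--     return self.stack.append(x)
--
--   def isEmpty(self):
--     return False if self.stack else True
--
-- def runDFSForTankT(tanks, GList, t, visited):
--   s = myStack()
--   s.push(t)
--   visited[t] = True
--
--   while not s.isEmpty():
--     i = s.pop()
--     for p in GList[i]:
--       if not visited[p]:
--         s.push(p)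
--         visited[p] = True;
--
-- def findMasterTank(tanks, pipes):
--   GList = {}
--   for i in tanks:
--     GList[i]=[]
--   for (i,j) in pipes:
--     GList[i].append(j)
--
--   visited = {t:False for t in tanks}
--
--   lastVisited = tanks[0]
--   for t in tanks:
--     if not visited[t]:
--       runDFSForTankT(tanks, GList, t, visited)
--       lastVisited = t
--
--   visited = {t:False for t in tanks}
--   runDFSForTankT(tanks, GList, lastVisited, visited)
--
--   for v in visited:
--     if not visited[v]:
--       return 0
--   return lastVisited
-- ===== SOURCE B (Python) =====
-- def findMasterTank(tanks, pipes):
--     # Brute force: test candidates in tank order and return the first one that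
--     # reaches every tank; reachability is computed by fixed-point relaxation over
--     # the raw pipe list (no adjacency structure, no stack, no DFS).  Pruning: if
--     # candidate c fails, every tank reachable from c fails too (a mother u
--     # reachable from c would make c itself a mother), so those are skipped.
--     def reach(s):
--         seen = {t: False for t in tanks}
--         seen[s] = True
--         changed = True
--         while changed:
--             changed = False
--             for (i, j) in pipes:
--                 if seen[i] and not seen[j]:
--                     seen[j] = True
--                     changed = True
--         return seen
--
--     failed = set()
--     for t in tanks:
--         if t in failed:
--             continue
--         seen = reach(t)
--         if all(seen[u] for u in tanks):
--             return t
--         failed.update(u for u in tanks if seen[u])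
--     return 0
-- ===== Notes on version B (the rewrite author's own statement) =====
-- stated objective: alternative
-- what changed: Replaced A's last-finishing-DFS candidate trick (stack-based DFS over every unvisited tank, remember the last root, re-DFS from it and verify) by a direct first-mother scan: for each tank in order, compute its reachable set by fixed-point relaxation over the raw pipe list (no adjacency dict, no stack, no DFS) and return the first tank that reaches all tanks, pruning tanks reachable from a failed candidate (they cannot be mothers).
import Mathlib
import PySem

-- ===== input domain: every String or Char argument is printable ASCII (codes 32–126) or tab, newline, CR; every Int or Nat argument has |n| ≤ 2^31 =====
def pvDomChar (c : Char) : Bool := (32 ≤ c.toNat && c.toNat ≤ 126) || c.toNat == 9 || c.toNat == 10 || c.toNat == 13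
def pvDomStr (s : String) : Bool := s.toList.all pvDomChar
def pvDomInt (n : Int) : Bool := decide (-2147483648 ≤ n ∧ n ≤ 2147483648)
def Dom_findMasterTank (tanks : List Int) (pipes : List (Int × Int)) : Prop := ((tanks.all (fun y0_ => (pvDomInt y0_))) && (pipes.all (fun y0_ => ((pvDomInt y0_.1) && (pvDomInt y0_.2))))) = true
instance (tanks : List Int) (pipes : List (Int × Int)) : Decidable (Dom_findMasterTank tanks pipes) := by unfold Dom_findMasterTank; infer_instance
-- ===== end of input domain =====

-- B replaces A's two-pass stack-DFS candidate trick (last DFS root, then verify) by a direct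
-- scan that returns the first tank reaching all tanks, with reachability computed by fixpoint
-- relaxation over the pipe list and failed candidates' reach-sets pruned (objective: alternative).


-- ===== PORT A =====
-- myStack is a LIFO stack (deque append/pop at the right): modelled as a List Int whose HEAD is the top
-- (push = cons, pop = head).  'GList[i].append(j)' and 'visited[p]' raise KeyError for keys outside
-- 'tanks'; those inputs (and 'tanks[0]' on empty 'tanks') are exactly what Pre_ excludes, so the
-- total forms 'modify _ []' / 'getD _ false' / 'headD 0' are exact on Pre_.

-- termination bookkeeping for the while-loop (not part of the algorithm): universe of pushable nodes
def pvUfA (adj : PySem.Dict Int (List Int)) : Finset Int := (adj.values.flatten).toFinset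

def pvMeasA (adj : PySem.Dict Int (List Int)) (stack : List Int) (vis : PySem.Dict Int Bool) : Nat :=
  ((pvUfA adj).filter (fun q => vis.getD q false = false)).card + stack.length

-- the body of 'for p in GList[i]: if not visited[p]: s.push(p); visited[p] = True'
def pvDfsFoldA (ns : List Int) (st : List Int × PySem.Dict Int Bool) : List Int × PySem.Dict Int Bool :=
  ns.foldl (fun s p => if s.2.getD p false = true then s else (p :: s.1, s.2.insert p true)) st

theorem pvMemUfA (adj : PySem.Dict Int (List Int)) (i : Int) :
    ∀ p ∈ adj.getD i [], p ∈ pvUfA adj := by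
  intro p hp
  rw [PySem.Dict.getD_eq_get?_getD] at hp
  cases h : adj.get? i with
  | none => rw [h] at hp; simp at hp
  | some l =>
    rw [h] at hp; simp at hp
    have hl : l ∈ adj.values := by
      have := PySem.Dict.mem_items_of_get?_eq_some (d := adj) h
      exact List.mem_map.mpr ⟨(i, l), this, rfl⟩
    simp [pvUfA, List.mem_flatten]
    exact ⟨l, hl, hp⟩

theorem pvFoldA_meas (adj : PySem.Dict Int (List Int)) (ns : List Int)
    (hns : ∀ p ∈ ns, p ∈ pvUfA adj) (st : List Int × PySem.Dict Int Bool) :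
    pvMeasA adj (pvDfsFoldA ns st).1 (pvDfsFoldA ns st).2 ≤ pvMeasA adj st.1 st.2 := by
  induction ns generalizing st with
  | nil => simp [pvDfsFoldA]
  | cons p ns ih =>
    have hstep : pvDfsFoldA (p :: ns) st
        = pvDfsFoldA ns (if st.2.getD p false = true then st else (p :: st.1, st.2.insert p true)) := rfl
    rw [hstep]
    by_cases h : st.2.getD p false = true
    · rw [if_pos h]; exact ih (fun q hq => hns q (by simp [hq])) st
    · rw [if_neg h]
      refine le_trans (ih (fun q hq => hns q (by simp [hq])) _) ?_
      -- one push: the false-universe shrinks by one, the stack grows by one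
      have hp : p ∈ pvUfA adj := hns p (by simp)
      have hfil : ((pvUfA adj).filter (fun q => (st.2.insert p true).getD q false = false))
          = ((pvUfA adj).filter (fun q => st.2.getD q false = false)).erase p := by
        ext q
        simp only [Finset.mem_filter, Finset.mem_erase, PySem.Dict.getD_insert]
        by_cases hq : q = p <;> simp [hq]
      have hpmem : p ∈ (pvUfA adj).filter (fun q => st.2.getD q false = false) := by
        simp only [Finset.mem_filter]
        exact ⟨hp, by simpa using h⟩
      have hcard := Finset.card_erase_of_mem hpmem
      have hpos : 0 < ((pvUfA adj).filter (fun q => st.2.getD q false = false)).card :=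
        Finset.card_pos.mpr ⟨p, hpmem⟩
      simp only [pvMeasA, hfil, hcard, List.length_cons]
      omega

def pvLoopA (adj : PySem.Dict Int (List Int)) (stack : List Int) (vis : PySem.Dict Int Bool) :
    PySem.Dict Int Bool :=
  match stack with
  | [] => vis
  | i :: rest =>
    let st := pvDfsFoldA (adj.getD i []) (rest, vis)
    pvLoopA adj st.1 st.2
termination_by pvMeasA adj stack vis
decreasing_by
  calc pvMeasA adj (pvDfsFoldA (adj.getD i []) (rest, vis)).1 (pvDfsFoldA (adj.getD i []) (rest, vis)).2
      ≤ pvMeasA adj rest vis := pvFoldA_meas adj _ (pvMemUfA adj i) (rest, vis)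
    _ < pvMeasA adj (i :: rest) vis := by simp [pvMeasA]

-- runDFSForTankT: push t, mark t, then the while-loop
def pvRunDfsA (adj : PySem.Dict Int (List Int)) (t : Int) (vis : PySem.Dict Int Bool) :
    PySem.Dict Int Bool :=
  pvLoopA adj [t] (vis.insert t true)

-- 'for v in visited: if not visited[v]: return 0' / 'return lastVisited'
def pvCheckA (vis : PySem.Dict Int Bool) : List Int → Int → Int
  | [], last => last
  | v :: rest, last => if vis.getD v false = false then 0 else pvCheckA vis rest last

def pvBuildGListA (tanks : List Int) (pipes : List (Int × Int)) : PySem.Dict Int (List Int) :=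
  let g := tanks.foldl (fun d i => d.insert i ([] : List Int)) PySem.Dict.empty
  pipes.foldl (fun d p => d.modify p.1 [] (fun l => l ++ [p.2])) g

def findMasterTank (tanks : List Int) (pipes : List (Int × Int)) : Int :=
  let GList := pvBuildGListA tanks pipes
  let visited := tanks.foldl (fun d t => d.insert t false) PySem.Dict.empty
  let st := tanks.foldl
    (fun (s : PySem.Dict Int Bool × Int) t =>
      if s.1.getD t false = true then s else (pvRunDfsA GList t s.1, t))
    (visited, tanks.headD 0)
  let visited2 := tanks.foldl (fun d t => d.insert t false) PySem.Dict.empty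
  let final := pvRunDfsA GList st.2 visited2
  pvCheckA final final.keys st.2

-- ===== PORT B =====
-- reach(s): 'seen = {t: False for t in tanks}; seen[s] = True; while changed: for (i,j) in pipes: …'.
-- 'seen[i]' / 'seen[j]' raise KeyError for keys outside 'tanks'; those inputs are outside Pre_, so
-- the total forms 'getD _ false' / 'insert' are exact on Pre_.

-- termination bookkeeping for the while-loop (not part of the algorithm): pushable targets
def pvTgtsB (pipes : List (Int × Int)) : Finset Int := (pipes.map Prod.snd).toFinset

-- one 'for (i, j) in pipes' pass of the relaxation: state = (seen, changed)
def pvRelaxB (pipes : List (Int × Int)) (st : PySem.Dict Int Bool × Bool) :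
    PySem.Dict Int Bool × Bool :=
  pipes.foldl
    (fun s p =>
      if s.1.getD p.1 false && !s.1.getD p.2 false
      then (s.1.insert p.2 true, true) else s)
    st

theorem pvRelaxB_mono (pipes : List (Int × Int)) (st : PySem.Dict Int Bool × Bool) (x : Int)
    (h : st.1.getD x false = true) : (pvRelaxB pipes st).1.getD x false = true := by
  induction pipes generalizing st with
  | nil => exact h
  | cons p ps ih =>
    by_cases hc : (st.1.getD p.1 false && !st.1.getD p.2 false) = true
    · have hstep : pvRelaxB (p :: ps) st = pvRelaxB ps (st.1.insert p.2 true, true) := by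
        simp only [pvRelaxB, List.foldl_cons]
        rw [if_pos hc]
      rw [hstep]
      refine ih _ ?_
      simp only [PySem.Dict.getD_insert]
      by_cases hxp : x = p.2 <;> simp [hxp, h]
    · have hstep : pvRelaxB (p :: ps) st = pvRelaxB ps st := by
        simp only [pvRelaxB, List.foldl_cons]
        rw [if_neg hc]
      rw [hstep]
      exact ih st h

theorem pvRelaxB_flag_grow (pipes : List (Int × Int)) (st : PySem.Dict Int Bool × Bool)
    (h : (pvRelaxB pipes st).2 = true) :
    st.2 = true ∨ ∃ x, x ∈ pvTgtsB pipes ∧ st.1.getD x false = false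
      ∧ (pvRelaxB pipes st).1.getD x false = true := by
  induction pipes generalizing st with
  | nil => exact Or.inl h
  | cons p ps ih =>
    by_cases hc : (st.1.getD p.1 false && !st.1.getD p.2 false) = true
    · have hstep : pvRelaxB (p :: ps) st = pvRelaxB ps (st.1.insert p.2 true, true) := by
        simp only [pvRelaxB, List.foldl_cons]
        rw [if_pos hc]
      rw [hstep]
      refine Or.inr ⟨p.2, by simp [pvTgtsB], ?_, ?_⟩
      · have h2 := ((Bool.and_eq_true _ _).mp hc).2
        rwa [Bool.not_eq_true'] at h2
      · exact pvRelaxB_mono ps _ _ (by simp [PySem.Dict.getD_insert_self])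
    · have hstep : pvRelaxB (p :: ps) st = pvRelaxB ps st := by
        simp only [pvRelaxB, List.foldl_cons]
        rw [if_neg hc]
      rw [hstep] at h ⊢
      rcases ih st h with h1 | ⟨x, hx1, hx2, hx3⟩
      · exact Or.inl h1
      · refine Or.inr ⟨x, ?_, hx2, hx3⟩
        simp only [pvTgtsB, List.map_cons, List.toFinset_cons, Finset.mem_insert]
        exact Or.inr (by simpa [pvTgtsB] using hx1)

-- 'while changed: changed = False; <relax pass>'
def pvReachLoopB (pipes : List (Int × Int)) (seen : PySem.Dict Int Bool) : PySem.Dict Int Bool :=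
  let r := pvRelaxB pipes (seen, false)
  if r.2 then pvReachLoopB pipes r.1 else r.1
termination_by ((pvTgtsB pipes).filter (fun q => seen.getD q false = false)).card
decreasing_by
  rename_i hflag
  apply Finset.card_lt_card
  constructor
  · intro q hq
    simp only [Finset.mem_filter] at hq ⊢
    refine ⟨hq.1, ?_⟩
    by_cases hs : seen.getD q false = true
    · have := pvRelaxB_mono pipes (seen, false) q hs
      rw [this] at hq
      exact Bool.noConfusion hq.2
    · rwa [Bool.not_eq_true] at hs
  · intro hsub
    rcases pvRelaxB_flag_grow pipes (seen, false) hflag with h1 | ⟨x, hx1, hx2, hx3⟩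
    · simp at h1
    · have hxin : x ∈ (pvTgtsB pipes).filter (fun q => seen.getD q false = false) :=
        Finset.mem_filter.mpr ⟨hx1, hx2⟩
      have := hsub hxin
      simp only [Finset.mem_filter] at this
      rw [hx3] at this
      exact Bool.noConfusion this.2

-- reach(s): all-False dict over tanks, seen[s] = True, relax to a fixpoint
def pvReachB (tanks : List Int) (pipes : List (Int × Int)) (s : Int) : PySem.Dict Int Bool :=
  pvReachLoopB pipes
    ((tanks.foldl (fun d t => d.insert t false) PySem.Dict.empty).insert s true)

-- 'for t in tanks: if t in failed: continue; seen = reach(t); if all(seen[u] for u in tanks): return t; failed.update(…)'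
def pvScanB (tanks : List Int) (pipes : List (Int × Int)) :
    List Int → PySem.Set Int → Int
  | [], _ => 0
  | t :: rest, failed =>
    if PySem.Set.contains failed t then pvScanB tanks pipes rest failed
    else
      let seen := pvReachB tanks pipes t
      if tanks.all (fun u => seen.getD u false) then t
      else pvScanB tanks pipes rest
        (PySem.Set.update failed (tanks.filter (fun u => seen.getD u false)))

def findMasterTank_alt (tanks : List Int) (pipes : List (Int × Int)) : Int :=
  pvScanB tanks pipes tanks PySem.Set.empty

-- ===== PRECONDITION & SPEC =====
-- Pre_ excludes exactly the inputs on which the Python A raises: empty 'tanks' (IndexError on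
-- tanks[0]) and pipes with an endpoint outside 'tanks' (KeyError on GList[i] / visited[p]).
def Pre_findMasterTank (tanks : List Int) (pipes : List (Int × Int)) : Prop :=
  tanks ≠ [] ∧ ∀ p ∈ pipes, p.1 ∈ tanks ∧ p.2 ∈ tanks
instance (tanks : List Int) (pipes : List (Int × Int)) : Decidable (Pre_findMasterTank tanks pipes) := by
  unfold Pre_findMasterTank; infer_instance

def pvWitness_findMasterTank : List Int × (List (Int × Int)) := ([1, 2], [(1, 2)])

def Spec_findMasterTank (tanks : List Int) (pipes : List (Int × Int)) (out : Int) : Prop :=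
  out = findMasterTank_alt tanks pipes
instance (tanks : List Int) (pipes : List (Int × Int)) (out : Int) :
    Decidable (Spec_findMasterTank tanks pipes out) := by
  unfold Spec_findMasterTank; infer_instance

-- ===== CLAIM (what is proved, stated in full; the proofs are below) =====
def Claim_equal_findMasterTank : Prop := ∀ (tanks : List Int) (pipes : List (Int × Int)), Dom_findMasterTank tanks pipes → Pre_findMasterTank tanks pipes → Spec_findMasterTank tanks pipes (findMasterTank tanks pipes)

-- ===== LEMMAS AND PROOFS =====

-- ---- facts about the inner for-loop of A's DFS ----

theorem foldA_cons (p : Int) (ns : List Int) (st : List Int × PySem.Dict Int Bool) :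
    pvDfsFoldA (p :: ns) st
      = pvDfsFoldA ns (if st.2.getD p false = true then st else (p :: st.1, st.2.insert p true)) := rfl

theorem foldA_mono (ns : List Int) (st : List Int × PySem.Dict Int Bool) (x : Int)
    (h : st.2.getD x false = true) : (pvDfsFoldA ns st).2.getD x false = true := by
  induction ns generalizing st with
  | nil => exact h
  | cons p ns ih =>
    rw [foldA_cons]
    by_cases hp : st.2.getD p false = true
    · rw [if_pos hp]; exact ih st h
    · rw [if_neg hp]
      refine ih _ ?_
      simp only [PySem.Dict.getD_insert]
      by_cases hxp : x = p <;> simp [hxp, h]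

theorem foldA_stack_sub (ns : List Int) (st : List Int × PySem.Dict Int Bool) (x : Int)
    (h : x ∈ st.1) : x ∈ (pvDfsFoldA ns st).1 := by
  induction ns generalizing st with
  | nil => exact h
  | cons p ns ih =>
    rw [foldA_cons]
    by_cases hp : st.2.getD p false = true
    · rw [if_pos hp]; exact ih st h
    · rw [if_neg hp]; exact ih _ (by simp [h])

theorem foldA_new_marked (ns : List Int) (st : List Int × PySem.Dict Int Bool) (x : Int)
    (h : (pvDfsFoldA ns st).2.getD x false = true) :
    st.2.getD x false = true ∨ x ∈ (pvDfsFoldA ns st).1 := by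
  induction ns generalizing st with
  | nil => exact Or.inl h
  | cons p ns ih =>
    rw [foldA_cons] at h ⊢
    by_cases hp : st.2.getD p false = true
    · rw [if_pos hp] at h ⊢; exact ih st h
    · rw [if_neg hp] at h ⊢
      rcases ih _ h with hm | hs
      · simp only [PySem.Dict.getD_insert] at hm
        by_cases hxp : x = p
        · subst hxp
          exact Or.inr (foldA_stack_sub _ _ _ (by simp))
        · rw [if_neg hxp] at hm; exact Or.inl hm
      · exact Or.inr hs

theorem foldA_ns_marked (ns : List Int) (st : List Int × PySem.Dict Int Bool) :
    ∀ y ∈ ns, (pvDfsFoldA ns st).2.getD y false = true := by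
  induction ns generalizing st with
  | nil => intro y hy; simp at hy
  | cons p ns ih =>
    intro y hy
    rw [foldA_cons]
    by_cases hp : st.2.getD p false = true
    · rw [if_pos hp]
      rcases List.mem_cons.mp hy with hyp | hyn
      · subst hyp; exact foldA_mono _ _ _ hp
      · exact ih st y hyn
    · rw [if_neg hp]
      rcases List.mem_cons.mp hy with hyp | hyn
      · subst hyp
        exact foldA_mono _ _ _ (by simp [PySem.Dict.getD_insert_self])
      · exact ih _ y hyn

theorem foldA_mark_sub (ns : List Int) (st : List Int × PySem.Dict Int Bool) (x : Int)
    (h : (pvDfsFoldA ns st).2.getD x false = true) :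
    st.2.getD x false = true ∨ x ∈ ns := by
  induction ns generalizing st with
  | nil => exact Or.inl h
  | cons p ns ih =>
    rw [foldA_cons] at h
    by_cases hp : st.2.getD p false = true
    · rw [if_pos hp] at h
      rcases ih st h with hm | hn
      · exact Or.inl hm
      · exact Or.inr (by simp [hn])
    · rw [if_neg hp] at h
      rcases ih _ h with hm | hn
      · simp only [PySem.Dict.getD_insert] at hm
        by_cases hxp : x = p
        · exact Or.inr (by simp [hxp])
        · rw [if_neg hxp] at hm; exact Or.inl hm
      · exact Or.inr (by simp [hn])

theorem foldA_stack_cases (ns : List Int) (st : List Int × PySem.Dict Int Bool) (x : Int)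
    (h : x ∈ (pvDfsFoldA ns st).1) : x ∈ st.1 ∨ x ∈ ns := by
  induction ns generalizing st with
  | nil => exact Or.inl h
  | cons p ns ih =>
    rw [foldA_cons] at h
    by_cases hp : st.2.getD p false = true
    · rw [if_pos hp] at h
      rcases ih st h with hs | hn
      · exact Or.inl hs
      · exact Or.inr (by simp [hn])
    · rw [if_neg hp] at h
      rcases ih _ h with hs | hn
      · rcases List.mem_cons.mp hs with hxp | hxs
        · exact Or.inr (by simp [hxp])
        · exact Or.inl hxs
      · exact Or.inr (by simp [hn])

theorem foldA_keys_cases (ns : List Int) (st : List Int × PySem.Dict Int Bool) (x : Int)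
    (h : x ∈ (pvDfsFoldA ns st).2.keys) :
    x ∈ st.2.keys ∨ (pvDfsFoldA ns st).2.getD x false = true := by
  induction ns generalizing st with
  | nil => exact Or.inl h
  | cons p ns ih =>
    rw [foldA_cons] at h ⊢
    by_cases hp : st.2.getD p false = true
    · rw [if_pos hp] at h ⊢; exact ih st h
    · rw [if_neg hp] at h ⊢
      rcases ih _ h with hk | hm
      · rcases (PySem.Dict.mem_keys_insert _ _ _ _).mp hk with hxp | hxk
        · subst hxp
          exact Or.inr (foldA_mono _ _ _ (by simp [PySem.Dict.getD_insert_self]))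
        · exact Or.inl hxk
      · exact Or.inr hm

theorem foldA_keys_mono (ns : List Int) (st : List Int × PySem.Dict Int Bool) (x : Int)
    (h : x ∈ st.2.keys) : x ∈ (pvDfsFoldA ns st).2.keys := by
  induction ns generalizing st with
  | nil => exact h
  | cons p ns ih =>
    rw [foldA_cons]
    by_cases hp : st.2.getD p false = true
    · rw [if_pos hp]; exact ih st h
    · rw [if_neg hp]
      exact ih _ ((PySem.Dict.mem_keys_insert _ _ _ _).mpr (Or.inr h))

-- ---- facts about A's while-loop ----

theorem loopA_nil (adj : PySem.Dict Int (List Int)) (vis : PySem.Dict Int Bool) :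
    pvLoopA adj [] vis = vis := by simp [pvLoopA]

theorem loopA_cons (adj : PySem.Dict Int (List Int)) (i : Int) (rest : List Int)
    (vis : PySem.Dict Int Bool) :
    pvLoopA adj (i :: rest) vis
      = pvLoopA adj (pvDfsFoldA (adj.getD i []) (rest, vis)).1
          (pvDfsFoldA (adj.getD i []) (rest, vis)).2 := by
  rw [pvLoopA]

theorem loopA_mono (adj : PySem.Dict Int (List Int)) (stack : List Int)
    (vis : PySem.Dict Int Bool) (x : Int) (h : vis.getD x false = true) :
    (pvLoopA adj stack vis).getD x false = true := by
  induction stack, vis using pvLoopA.induct adj with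
  | case1 vis => rwa [loopA_nil]
  | case2 vis i rest st ih =>
    rw [loopA_cons]
    exact ih (foldA_mono _ _ _ h)

theorem loopA_keys_mono (adj : PySem.Dict Int (List Int)) (stack : List Int)
    (vis : PySem.Dict Int Bool) (x : Int) (h : x ∈ vis.keys) :
    x ∈ (pvLoopA adj stack vis).keys := by
  induction stack, vis using pvLoopA.induct adj with
  | case1 vis => rwa [loopA_nil]
  | case2 vis i rest st ih =>
    rw [loopA_cons]
    exact ih (foldA_keys_mono _ _ _ h)

theorem loopA_keys_cases (adj : PySem.Dict Int (List Int)) (stack : List Int)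
    (vis : PySem.Dict Int Bool) (x : Int) (h : x ∈ (pvLoopA adj stack vis).keys) :
    x ∈ vis.keys ∨ (pvLoopA adj stack vis).getD x false = true := by
  induction stack, vis using pvLoopA.induct adj with
  | case1 vis => rw [loopA_nil] at h; exact Or.inl h
  | case2 vis i rest st ih =>
    rw [loopA_cons] at h ⊢
    rcases ih h with hk | hm
    · rcases foldA_keys_cases _ _ _ hk with hk' | hm'
      · exact Or.inl hk'
      · exact Or.inr (loopA_mono _ _ _ _ hm')
    · exact Or.inr hm

theorem loopA_closed (adj : PySem.Dict Int (List Int)) (stack : List Int)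
    (vis : PySem.Dict Int Bool)
    (hinv : ∀ x, vis.getD x false = true →
      x ∈ stack ∨ ∀ y ∈ adj.getD x [], vis.getD y false = true) :
    ∀ x, (pvLoopA adj stack vis).getD x false = true →
      ∀ y ∈ adj.getD x [], (pvLoopA adj stack vis).getD y false = true := by
  induction stack, vis using pvLoopA.induct adj with
  | case1 vis =>
    rw [loopA_nil]
    intro x hx y hy
    rcases hinv x hx with hs | hc
    · simp at hs
    · exact hc y hy
  | case2 vis i rest st ih =>
    rw [loopA_cons]
    refine ih ?_
    intro x hx
    by_cases hv : vis.getD x false = true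
    · rcases hinv x hv with hs | hc
      · rcases List.mem_cons.mp hs with hxi | hxr
        · subst hxi
          exact Or.inr (fun y hy => foldA_ns_marked _ _ y hy)
        · exact Or.inl (foldA_stack_sub _ _ _ hxr)
      · exact Or.inr (fun y hy => foldA_mono _ _ _ (hc y hy))
    · rcases foldA_new_marked _ _ _ hx with hm | hs
      · exact absurd hm hv
      · exact Or.inl hs

theorem loopA_min (adj : PySem.Dict Int (List Int)) (stack : List Int)
    (vis : PySem.Dict Int Bool) (W : Int → Prop)
    (h1 : ∀ x, vis.getD x false = true → W x)
    (h2 : ∀ x ∈ stack, W x)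
    (hc : ∀ x, W x → ∀ y ∈ adj.getD x [], W y) :
    ∀ x, (pvLoopA adj stack vis).getD x false = true → W x := by
  induction stack, vis using pvLoopA.induct adj with
  | case1 vis => rw [loopA_nil]; exact h1
  | case2 vis i rest st ih =>
    rw [loopA_cons]
    refine ih ?_ ?_
    · intro x hx
      rcases foldA_mark_sub _ _ _ hx with hm | hn
      · exact h1 x hm
      · exact hc i (h2 i (by simp)) x hn
    · intro x hx
      rcases foldA_stack_cases _ _ _ hx with hs | hn
      · exact h2 x (by simp [hs])
      · exact hc i (h2 i (by simp)) x hn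

-- ---- facts about B's relaxation fixpoint ----

theorem reachLoopB_eq (pipes : List (Int × Int)) (seen : PySem.Dict Int Bool) :
    pvReachLoopB pipes seen
      = (if (pvRelaxB pipes (seen, false)).2 then pvReachLoopB pipes (pvRelaxB pipes (seen, false)).1
         else (pvRelaxB pipes (seen, false)).1) := by
  rw [pvReachLoopB]

theorem reachLoopB_mono (pipes : List (Int × Int)) (seen : PySem.Dict Int Bool) (x : Int)
    (h : seen.getD x false = true) : (pvReachLoopB pipes seen).getD x false = true := by
  induction seen using pvReachLoopB.induct pipes with
  | case1 seen r hr ih =>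
    rw [reachLoopB_eq, if_pos hr]
    exact ih (pvRelaxB_mono pipes (seen, false) x h)
  | case2 seen r hr =>
    rw [reachLoopB_eq, if_neg hr]
    exact pvRelaxB_mono pipes (seen, false) x h

theorem pvRelaxB_flag_mono (pipes : List (Int × Int)) (st : PySem.Dict Int Bool × Bool)
    (h : st.2 = true) : (pvRelaxB pipes st).2 = true := by
  induction pipes generalizing st with
  | nil => exact h
  | cons p ps ih =>
    by_cases hc : (st.1.getD p.1 false && !st.1.getD p.2 false) = true
    · have hstep : pvRelaxB (p :: ps) st = pvRelaxB ps (st.1.insert p.2 true, true) := by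
        simp only [pvRelaxB, List.foldl_cons]
        rw [if_pos hc]
      rw [hstep]
      exact ih _ rfl
    · have hstep : pvRelaxB (p :: ps) st = pvRelaxB ps st := by
        simp only [pvRelaxB, List.foldl_cons]
        rw [if_neg hc]
      rw [hstep]
      exact ih st h

theorem relaxB_fixed (pipes : List (Int × Int)) (s : PySem.Dict Int Bool)
    (h : (pvRelaxB pipes (s, false)).2 = false) :
    (pvRelaxB pipes (s, false)).1 = s
      ∧ ∀ p ∈ pipes, s.getD p.1 false = true → s.getD p.2 false = true := by
  induction pipes with
  | nil => exact ⟨rfl, by simp⟩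
  | cons p ps ih =>
    by_cases hc : (s.getD p.1 false && !s.getD p.2 false) = true
    · exfalso
      have hstep : pvRelaxB (p :: ps) (s, false) = pvRelaxB ps (s.insert p.2 true, true) := by
        simp only [pvRelaxB, List.foldl_cons]
        rw [if_pos hc]
      rw [hstep, pvRelaxB_flag_mono ps _ rfl] at h
      exact Bool.noConfusion h
    · have hstep : pvRelaxB (p :: ps) (s, false) = pvRelaxB ps (s, false) := by
        simp only [pvRelaxB, List.foldl_cons]
        rw [if_neg hc]
      rw [hstep] at h
      obtain ⟨h1, h2⟩ := ih h
      refine ⟨by rw [hstep]; exact h1, ?_⟩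
      intro q hq hq1
      rcases List.mem_cons.mp hq with hqp | hqs
      · subst hqp
        by_contra hq2
        apply hc
        rw [Bool.and_eq_true, Bool.not_eq_true']
        exact ⟨hq1, by rwa [Bool.not_eq_true] at hq2⟩
      · exact h2 q hqs hq1

theorem reachLoopB_closed (pipes : List (Int × Int)) (seen : PySem.Dict Int Bool) :
    ∀ p ∈ pipes, (pvReachLoopB pipes seen).getD p.1 false = true →
      (pvReachLoopB pipes seen).getD p.2 false = true := by
  induction seen using pvReachLoopB.induct pipes with
  | case1 seen r hr ih =>
    rw [reachLoopB_eq, if_pos hr]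
    exact ih
  | case2 seen r hr =>
    rw [reachLoopB_eq, if_neg hr]
    have hfix := relaxB_fixed pipes seen (by simpa using hr)
    rw [hfix.1]
    exact hfix.2

theorem relaxB_min (pipes : List (Int × Int)) (st : PySem.Dict Int Bool × Bool) (W : Int → Prop)
    (h0 : ∀ x, st.1.getD x false = true → W x) (hc : ∀ p ∈ pipes, W p.1 → W p.2) :
    ∀ x, (pvRelaxB pipes st).1.getD x false = true → W x := by
  induction pipes generalizing st with
  | nil => exact h0
  | cons p ps ih =>
    by_cases hcc : (st.1.getD p.1 false && !st.1.getD p.2 false) = true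
    · have hstep : pvRelaxB (p :: ps) st = pvRelaxB ps (st.1.insert p.2 true, true) := by
        simp only [pvRelaxB, List.foldl_cons]
        rw [if_pos hcc]
      rw [hstep]
      refine ih _ ?_ (fun q hq => hc q (by simp [hq]))
      intro x hx
      simp only [PySem.Dict.getD_insert] at hx
      by_cases hxp : x = p.2
      · subst hxp
        exact hc p (by simp) (h0 p.1 ((Bool.and_eq_true _ _).mp hcc).1)
      · rw [if_neg hxp] at hx
        exact h0 x hx
    · have hstep : pvRelaxB (p :: ps) st = pvRelaxB ps st := by
        simp only [pvRelaxB, List.foldl_cons]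
        rw [if_neg hcc]
      rw [hstep]
      exact ih st h0 (fun q hq => hc q (by simp [hq]))

theorem reachLoopB_min (pipes : List (Int × Int)) (seen : PySem.Dict Int Bool) (W : Int → Prop)
    (h0 : ∀ x, seen.getD x false = true → W x) (hc : ∀ p ∈ pipes, W p.1 → W p.2) :
    ∀ x, (pvReachLoopB pipes seen).getD x false = true → W x := by
  induction seen using pvReachLoopB.induct pipes with
  | case1 seen r hr ih =>
    rw [reachLoopB_eq, if_pos hr]
    exact ih (relaxB_min pipes (seen, false) W h0 hc)
  | case2 seen r hr =>
    rw [reachLoopB_eq, if_neg hr]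
    exact relaxB_min pipes (seen, false) W h0 hc

-- ---- the initial all-False visited dict ----

theorem init_false (ts : List Int) (x : Int) :
    (ts.foldl (fun d t => d.insert t false) PySem.Dict.empty).getD x false = false := by
  have aux : ∀ (d : PySem.Dict Int Bool), d.getD x false = false →
      (ts.foldl (fun d t => d.insert t false) d).getD x false = false := by
    induction ts with
    | nil => intro d h; exact h
    | cons t ts ih =>
      intro d h
      simp only [List.foldl_cons]
      refine ih _ ?_
      simp only [PySem.Dict.getD_insert]
      by_cases hxt : x = t <;> simp [hxt, h]
  exact aux _ (by simp [PySem.Dict.getD_empty])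

theorem init_keys (ts : List Int) (x : Int) :
    x ∈ (ts.foldl (fun d t => d.insert t false) PySem.Dict.empty).keys ↔ x ∈ ts := by
  have h := PySem.Dict.keys_foldl_insert (κ := Int) (ν := Bool) ts (fun _ _ => false)
    PySem.Dict.empty
  rw [h, PySem.Dict.keys_empty]
  exact PySem.Set.mem_update _ _ _ |>.trans (by simp)

theorem initB_true (tanks : List Int) (s x : Int) :
    ((tanks.foldl (fun d t => d.insert t false) PySem.Dict.empty).insert s true).getD x false
      = true ↔ x = s := by
  simp only [PySem.Dict.getD_insert]
  by_cases hxs : x = s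
  · simp [hxs]
  · rw [if_neg hxs, init_false]
    simp [hxs]

-- ---- reach(t) is the least pipe-closed set containing t ----

theorem rchB_self (tanks : List Int) (pipes : List (Int × Int)) (t : Int) :
    (pvReachB tanks pipes t).getD t false = true :=
  reachLoopB_mono pipes _ t ((initB_true tanks t t).mpr rfl)

theorem rchB_closed (tanks : List Int) (pipes : List (Int × Int)) (t : Int) :
    ∀ p ∈ pipes, (pvReachB tanks pipes t).getD p.1 false = true →
      (pvReachB tanks pipes t).getD p.2 false = true :=
  reachLoopB_closed pipes _

theorem rchB_min (tanks : List Int) (pipes : List (Int × Int)) (t : Int) (W : Int → Prop)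
    (h0 : W t) (hc : ∀ p ∈ pipes, W p.1 → W p.2) :
    ∀ x, (pvReachB tanks pipes t).getD x false = true → W x := by
  refine reachLoopB_min pipes _ W ?_ hc
  intro x hx
  rw [initB_true tanks t x] at hx
  rw [hx]
  exact h0

theorem rchB_trans (tanks : List Int) (pipes : List (Int × Int)) (t x : Int)
    (h : (pvReachB tanks pipes t).getD x false = true) :
    ∀ z, (pvReachB tanks pipes x).getD z false = true →
      (pvReachB tanks pipes t).getD z false = true :=
  rchB_min tanks pipes x (fun z => (pvReachB tanks pipes t).getD z false = true) h
    (rchB_closed tanks pipes t)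

-- ---- the adjacency dict holds exactly the pipe successors ----

theorem base_getD_nil (tanks : List Int) (x : Int) :
    (tanks.foldl (fun d i => d.insert i ([] : List Int)) PySem.Dict.empty).getD x [] = [] := by
  have aux : ∀ (d : PySem.Dict Int (List Int)), d.getD x [] = [] →
      (tanks.foldl (fun d i => d.insert i ([] : List Int)) d).getD x [] = [] := by
    induction tanks with
    | nil => intro d h; exact h
    | cons t ts ih =>
      intro d h
      simp only [List.foldl_cons]
      refine ih _ ?_
      simp only [PySem.Dict.getD_insert]
      by_cases hxt : x = t <;> simp [hxt, h]
  exact aux _ (by simp [PySem.Dict.getD_empty])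

theorem adj_mem (tanks : List Int) (pipes : List (Int × Int)) (x y : Int) :
    y ∈ (pvBuildGListA tanks pipes).getD x [] ↔ (x, y) ∈ pipes := by
  unfold pvBuildGListA
  rw [PySem.Dict.getD_foldl_modify_append, base_getD_nil]
  simp only [List.nil_append, List.mem_map, List.mem_filter]
  constructor
  · rintro ⟨p, ⟨hp, hpx⟩, hpy⟩
    have : p = (x, y) := by
      have hx : p.1 = x := by simpa using hpx
      exact Prod.ext hx hpy
    rwa [this] at hp
  · intro h
    exact ⟨(x, y), ⟨h, by simp⟩, rfl⟩

-- ---- one DFS call of A marks exactly (old marks ∪ reach of the root) ----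

theorem runDfs_char (tanks : List Int) (pipes : List (Int × Int)) (vis : PySem.Dict Int Bool)
    (t : Int)
    (hcl : ∀ p ∈ pipes, vis.getD p.1 false = true → vis.getD p.2 false = true) :
    ∀ x, (pvRunDfsA (pvBuildGListA tanks pipes) t vis).getD x false = true
      ↔ (vis.getD x false = true ∨ (pvReachB tanks pipes t).getD x false = true) := by
  intro x
  constructor
  · intro hx
    refine loopA_min (pvBuildGListA tanks pipes) [t] (vis.insert t true)
      (fun z => vis.getD z false = true ∨ (pvReachB tanks pipes t).getD z false = true)
      ?_ ?_ ?_ x hx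
    · intro z hz
      simp only [PySem.Dict.getD_insert] at hz
      by_cases hzt : z = t
      · exact Or.inr (by rw [hzt]; exact rchB_self tanks pipes t)
      · rw [if_neg hzt] at hz; exact Or.inl hz
    · intro z hz
      simp at hz
      exact Or.inr (by rw [hz]; exact rchB_self tanks pipes t)
    · intro z hz y hy
      have hpy : (z, y) ∈ pipes := (adj_mem tanks pipes z y).mp hy
      rcases hz with hv | hr
      · exact Or.inl (hcl (z, y) hpy hv)
      · exact Or.inr (rchB_closed tanks pipes t (z, y) hpy hr)
  · intro hx
    rcases hx with hv | hr
    · exact loopA_mono _ _ _ _ (by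
        simp only [PySem.Dict.getD_insert]
        by_cases hxt : x = t
        · simp [hxt]
        · rw [if_neg hxt]; exact hv)
    · refine rchB_min tanks pipes t
        (fun z => (pvRunDfsA (pvBuildGListA tanks pipes) t vis).getD z false = true)
        ?_ ?_ x hr
      · exact loopA_mono _ _ _ _ (by simp [PySem.Dict.getD_insert_self])
      · intro p hp hp1
        refine loopA_closed (pvBuildGListA tanks pipes) [t] (vis.insert t true) ?_ p.1 hp1 p.2
          ((adj_mem tanks pipes p.1 p.2).mpr hp)
        intro w hw
        simp only [PySem.Dict.getD_insert] at hw
        by_cases hwt : w = t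
        · exact Or.inl (by simp [hwt])
        · rw [if_neg hwt] at hw
          refine Or.inr (fun y' hy' => ?_)
          have hpy : (w, y') ∈ pipes := (adj_mem tanks pipes w y').mp hy'
          have := hcl (w, y') hpy hw
          simp only [PySem.Dict.getD_insert]
          by_cases hyt : y' = t
          · simp [hyt]
          · rw [if_neg hyt]; exact this

-- ---- the final key-scan of A ----

theorem checkA_eq (vis : PySem.Dict Int Bool) (ks : List Int) (last : Int) :
    pvCheckA vis ks last = if ks.all (fun v => vis.getD v false) then last else 0 := by
  induction ks with
  | nil => simp [pvCheckA]
  | cons v ks ih =>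
    simp only [pvCheckA, List.all_cons]
    by_cases hv : vis.getD v false = false
    · simp [hv]
    · have hv' : vis.getD v false = true := by
        cases h : vis.getD v false
        · exact absurd h hv
        · rfl
      rw [if_neg hv, ih]
      simp [hv']

-- ---- the "mother tank" predicate and B's scan ----

-- plain (unpruned) first-mother scan, used as a bridge between the two programs
def pvScanPlain (tanks : List Int) (pipes : List (Int × Int)) : List Int → Int
  | [] => 0
  | t :: rest =>
    if tanks.all (fun u => (pvReachB tanks pipes t).getD u false) then t
    else pvScanPlain tanks pipes rest

theorem mother_all_iff (tanks : List Int) (pipes : List (Int × Int)) (t : Int) :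
    (tanks.all (fun u => (pvReachB tanks pipes t).getD u false)) = true
      ↔ ∀ u ∈ tanks, (pvReachB tanks pipes t).getD u false = true :=
  List.all_eq_true

theorem mother_trans (tanks : List Int) (pipes : List (Int × Int)) (t x : Int)
    (hx : (pvReachB tanks pipes t).getD x false = true)
    (hm : ∀ u ∈ tanks, (pvReachB tanks pipes x).getD u false = true) :
    ∀ u ∈ tanks, (pvReachB tanks pipes t).getD u false = true := by
  intro u hu
  exact rchB_trans tanks pipes t x hx u (hm u hu)

theorem scanB_eq_plain (tanks : List Int) (pipes : List (Int × Int)) :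
    ∀ (ts : List Int) (failed : PySem.Set Int),
    (∀ x ∈ failed, ¬ (∀ u ∈ tanks, (pvReachB tanks pipes x).getD u false = true)) →
    pvScanB tanks pipes ts failed = pvScanPlain tanks pipes ts := by
  intro ts
  induction ts with
  | nil => intro failed _; rfl
  | cons t rest ih =>
    intro failed hf
    simp only [pvScanB, pvScanPlain]
    by_cases hft : PySem.Set.contains failed t = true
    · rw [if_pos hft]
      have hnm : ¬ (∀ u ∈ tanks, (pvReachB tanks pipes t).getD u false = true) :=
        hf t ((PySem.Set.contains_iff _ _).mp hft)
      have hall : ¬ (tanks.all (fun u => (pvReachB tanks pipes t).getD u false)) = true := by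
        intro h; exact hnm ((mother_all_iff tanks pipes t).mp h)
      rw [if_neg hall]
      exact ih failed hf
    · rw [if_neg hft]
      by_cases hall : (tanks.all (fun u => (pvReachB tanks pipes t).getD u false)) = true
      · rw [if_pos hall, if_pos hall]
      · rw [if_neg hall, if_neg hall]
        refine ih _ ?_
        intro x hx hm
        rcases (PySem.Set.mem_update _ _ _).mp hx with hxf | hxr
        · exact hf x hxf hm
        · have hxt : (pvReachB tanks pipes t).getD x false = true :=
            (List.mem_filter.mp hxr).2
          exact hall ((mother_all_iff tanks pipes t).mpr (mother_trans tanks pipes t x hxt hm))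

-- ---- pass 1 of A computes the first mother tank ----

theorem foldA_skip_all (adj : PySem.Dict Int (List Int)) (ts : List Int)
    (vis : PySem.Dict Int Bool) (last : Int)
    (h : ∀ u ∈ ts, vis.getD u false = true) :
    ts.foldl (fun (s : PySem.Dict Int Bool × Int) t =>
        if s.1.getD t false = true then s else (pvRunDfsA adj t s.1, t)) (vis, last)
      = (vis, last) := by
  induction ts with
  | nil => rfl
  | cons t rest ih =>
    simp only [List.foldl_cons, h t (by simp), if_true]
    exact ih (fun u hu => h u (by simp [hu]))

theorem main_ind (tanks : List Int) (pipes : List (Int × Int)) :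
    ∀ (ts : List Int) (vis : PySem.Dict Int Bool) (last : Int),
    (∀ u ∈ ts, u ∈ tanks) →
    (∀ p ∈ pipes, vis.getD p.1 false = true → vis.getD p.2 false = true) →
    (∀ x, vis.getD x false = true →
      ¬ (∀ u ∈ tanks, (pvReachB tanks pipes x).getD u false = true)) →
    ((∃ x, vis.getD x false = true) → vis.getD last false = true) →
    (ts = [] → ∃ x, vis.getD x false = true) →
    (let res := ts.foldl (fun (s : PySem.Dict Int Bool × Int) t =>
        if s.1.getD t false = true then s else (pvRunDfsA (pvBuildGListA tanks pipes) t s.1, t))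
        (vis, last)
     (if tanks.all (fun u => (pvReachB tanks pipes res.2).getD u false) then res.2 else 0))
      = pvScanPlain tanks pipes ts := by
  intro ts
  induction ts with
  | nil =>
    intro vis last _ _ hnm hlast hne
    simp only [List.foldl_nil, pvScanPlain]
    have hlt : vis.getD last false = true := hlast (hne rfl)
    have : ¬ (tanks.all (fun u => (pvReachB tanks pipes last).getD u false)) = true := by
      intro h
      exact hnm last hlt ((mother_all_iff tanks pipes last).mp h)
    rw [if_neg this]
  | cons t rest ih =>
    intro vis last hts hclv hnm hlast _
    simp only [List.foldl_cons, pvScanPlain]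
    by_cases hvt : vis.getD t false = true
    · rw [if_pos hvt]
      have hnmt : ¬ (∀ u ∈ tanks, (pvReachB tanks pipes t).getD u false = true) := hnm t hvt
      have hallf : ¬ (tanks.all (fun u => (pvReachB tanks pipes t).getD u false)) = true := by
        intro h; exact hnmt ((mother_all_iff tanks pipes t).mp h)
      rw [if_neg hallf]
      exact ih vis last (fun u hu => hts u (by simp [hu])) hclv hnm hlast
        (fun _ => ⟨t, hvt⟩)
    · rw [if_neg hvt]
      have hchar := runDfs_char tanks pipes vis t hclv
      by_cases hall : (tanks.all (fun u => (pvReachB tanks pipes t).getD u false)) = true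
      · rw [if_pos hall]
        have hmt : ∀ u ∈ tanks, (pvReachB tanks pipes t).getD u false = true :=
          (mother_all_iff tanks pipes t).mp hall
        have hskip := foldA_skip_all (pvBuildGListA tanks pipes) rest
          (pvRunDfsA (pvBuildGListA tanks pipes) t vis) t
          (fun u hu => (hchar u).mpr (Or.inr (hmt u (hts u (by simp [hu])))))
        rw [hskip]
        simp only [if_pos hall]
      · rw [if_neg hall]
        have hnmt : ¬ (∀ u ∈ tanks, (pvReachB tanks pipes t).getD u false = true) := by
          intro h; exact hall ((mother_all_iff tanks pipes t).mpr h)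
        refine ih _ t (fun u hu => hts u (by simp [hu])) ?_ ?_ ?_ ?_
        · intro p hp h1
          rcases (hchar p.1).mp h1 with hv | hr
          · exact (hchar p.2).mpr (Or.inl (hclv p hp hv))
          · exact (hchar p.2).mpr (Or.inr (rchB_closed tanks pipes t p hp hr))
        · intro x hx hm
          rcases (hchar x).mp hx with hv | hr
          · exact hnm x hv hm
          · exact hnmt (mother_trans tanks pipes t x hr hm)
        · intro _
          exact (hchar t).mpr (Or.inr (rchB_self tanks pipes t))
        · intro _
          exact ⟨t, (hchar t).mpr (Or.inr (rchB_self tanks pipes t))⟩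

-- ---- the assembled equivalence ----

theorem pv_main (tanks : List Int) (pipes : List (Int × Int))
    (hpre : Pre_findMasterTank tanks pipes) :
    findMasterTank tanks pipes = findMasterTank_alt tanks pipes := by
  obtain ⟨hne, -⟩ := hpre
  simp only [findMasterTank, findMasterTank_alt]
  set adj := pvBuildGListA tanks pipes with hadj
  set vis0 := tanks.foldl (fun d t => d.insert t false) PySem.Dict.empty with hvis0
  have hclv0 : ∀ p ∈ pipes, vis0.getD p.1 false = true → vis0.getD p.2 false = true := by
    intro p _ h
    rw [hvis0, init_false] at h
    exact Bool.noConfusion h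
  set st := tanks.foldl (fun (s : PySem.Dict Int Bool × Int) t =>
      if s.1.getD t false = true then s else (pvRunDfsA adj t s.1, t)) (vis0, tanks.headD 0)
    with hst
  -- the final check equals "every tank is in reach(st.2)"
  have hchar2 := runDfs_char tanks pipes vis0 st.2 hclv0
  set final := pvRunDfsA adj st.2 vis0 with hfinal
  have hcharf : ∀ x, final.getD x false = true
      ↔ (pvReachB tanks pipes st.2).getD x false = true := by
    intro x
    rw [hfinal, hadj, hchar2 x]
    constructor
    · rintro (hv | hr)
      · rw [hvis0, init_false] at hv; exact Bool.noConfusion hv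
      · exact hr
    · exact Or.inr
  have hall : (final.keys.all (fun v => final.getD v false))
      = (tanks.all (fun u => (pvReachB tanks pipes st.2).getD u false)) := by
    have hiff : (∀ v ∈ final.keys, final.getD v false = true)
        ↔ (∀ u ∈ tanks, (pvReachB tanks pipes st.2).getD u false = true) := by
      constructor
      · intro h u hu
        have hk : u ∈ final.keys := by
          rw [hfinal, pvRunDfsA]
          exact loopA_keys_mono _ _ _ _
            ((PySem.Dict.mem_keys_insert _ _ _ _).mpr (Or.inr ((init_keys tanks u).mpr hu)))
        exact (hcharf u).mp (h u hk)
      · intro h v hk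
        rw [hfinal, pvRunDfsA] at hk
        rcases loopA_keys_cases _ _ _ _ hk with hk' | hm
        · rcases (PySem.Dict.mem_keys_insert _ _ _ _).mp hk' with hvt | hvk
          · exact (hcharf v).mpr (by rw [hvt]; exact rchB_self tanks pipes st.2)
          · exact (hcharf v).mpr (h v ((init_keys tanks v).mp hvk))
        · exact hm
    cases hA : final.keys.all (fun v => final.getD v false) with
    | true =>
      have := List.all_eq_true.mp hA
      symm
      rw [List.all_eq_true]
      intro u hu
      exact hiff.mp (fun v hv => this v hv) u hu
    | false =>
      symm
      rw [← Bool.not_eq_true, List.all_eq_true]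
      intro hB
      rw [← Bool.not_eq_true, List.all_eq_true] at hA
      exact hA (fun v hv => hiff.mpr (fun u hu => hB u hu) v hv)
  rw [checkA_eq, hall]
  -- pass 1 + check = plain first-mother scan = B's pruned scan
  have hmain := main_ind tanks pipes tanks vis0 (tanks.headD 0)
    (fun u hu => hu) hclv0
    (fun x hx => by rw [hvis0, init_false] at hx; exact absurd hx (by simp))
    (fun ⟨x, hx⟩ => by rw [hvis0, init_false] at hx; exact absurd hx (by simp))
    (fun h => absurd h hne)
  simp only [← hadj, ← hst] at hmain
  rw [hmain]
  symm
  exact scanB_eq_plain tanks pipes tanks PySem.Set.empty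
    (fun x hx => by simp [PySem.Set.empty] at hx)

-- ===== VERDICT (by name: the statement is the Claim_ definition above) =====
theorem findMasterTank_spec : Claim_equal_findMasterTank := by
  intro tanks pipes _ hpre
  unfold Spec_findMasterTank
  exact pv_main tanks pipes hpre
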